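-- pv_equiv track=rewrite | github.com/wa01/Phase2Tracking | DrawHits/drawHits.py | cutLines
-- ===== SOURCE A (Python) =====
-- def cutLines(cuts,maxChar=40):
--     result = [ ]
--     line = ""
--     for ic,c in enumerate(cuts):
--         line += c
--         if ic<(len(cuts)-1):
--             line += "&&"
--         if len(line)>maxChar:
--             result.append(line)
--             line = ""
--     if line!="":
--         result.append(line)
--     return result
-- ===== SOURCE B (Python) =====
-- def cutLines(cuts, maxChar=40):
--     # Build the whole joined string once, compute each item's end offset in it,
--     # then cut the joined string at greedy flush points by slicing.
--     joined = "&&".join(cuts)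
--     ends = []
--     pos = 0
--     for i, c in enumerate(cuts):
--         pos += len(c) + (2 if i < len(cuts) - 1 else 0)
--         ends.append(pos)
--     result = []
--     start = 0
--     for e in ends:
--         if e - start > maxChar:
--             result.append(joined[start:e])
--             start = e
--     if start < len(joined):
--         result.append(joined[start:])
--     return result
-- ===== Notes on version B (the rewrite author's own statement) =====
-- stated objective: alternative
-- what changed: B never accumulates a growing line: it builds the whole '&&'-joined string once, computes each item's cumulative end offset in it, picks greedy flush offsets by comparing offset differences to maxChar, and returns slices of the joined string between flush points.
import Mathlib
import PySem

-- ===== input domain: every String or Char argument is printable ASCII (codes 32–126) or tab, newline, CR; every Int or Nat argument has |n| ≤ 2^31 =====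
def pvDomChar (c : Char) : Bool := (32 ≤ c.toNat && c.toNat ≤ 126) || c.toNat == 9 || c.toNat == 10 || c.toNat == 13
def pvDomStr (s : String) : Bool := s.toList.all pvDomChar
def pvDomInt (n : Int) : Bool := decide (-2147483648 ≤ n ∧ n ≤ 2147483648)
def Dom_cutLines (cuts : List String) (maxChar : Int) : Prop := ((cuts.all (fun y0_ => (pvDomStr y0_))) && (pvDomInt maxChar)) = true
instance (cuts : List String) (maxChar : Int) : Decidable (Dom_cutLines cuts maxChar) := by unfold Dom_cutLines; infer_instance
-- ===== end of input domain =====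

-- B builds the '&&'-joined string once and cuts it by cumulative offsets instead of accumulating a line (objective: alternative algorithm, same cost).

-- ===== PORT A =====
-- A's loop body: line += c; if ic < len(cuts)-1: line += "&&"; if len(line) > maxChar: flush.
-- line is kept as List Char (Python str concatenation/len, exact on the domain).
def cutLinesStep (n : Int) (maxChar : Int) (st : List String × List Char) (p : Int × String) : List String × List Char :=
  let line := st.2 ++ p.2.toList
  let line := if p.1 < n - 1 then line ++ ['&', '&'] else line
  if (line.length : Int) > maxChar then (st.1 ++ [String.ofList line], []) else (st.1, line)

def cutLines (cuts : List String) (maxChar : Int) : List String :=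
  let st := (PySem.List.enumerate cuts 0).foldl (cutLinesStep (cuts.length : Int) maxChar) ([], [])
  if st.2 ≠ [] then st.1 ++ [String.ofList st.2] else st.1

-- ===== PORT B =====
-- Source B's first loop: pos += len(c) + (2 if i < len(cuts)-1 else 0); ends.append(pos)
def endsStep (n : Int) (st : Int × List Int) (p : Int × String) : Int × List Int :=
  let pos := st.1 + PySem.Str.len p.2 + (if p.1 < n - 1 then 2 else 0)
  (pos, st.2 ++ [pos])

-- Source B's second loop: if e - start > maxChar: result.append(joined[start:e]); start = e
def cutStep (joined : String) (maxChar : Int) (st : List String × Int) (e : Int) : List String × Int :=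
  if e - st.2 > maxChar then (st.1 ++ [PySem.Str.slice joined (some st.2) (some e)], e) else st

def cutLines_alt (cuts : List String) (maxChar : Int) : List String :=
  let joined := PySem.Str.join "&&" cuts
  let ends := ((PySem.List.enumerate cuts 0).foldl (endsStep (cuts.length : Int)) (0, [])).2
  let st := ends.foldl (cutStep joined maxChar) ([], 0)
  if st.2 < PySem.Str.len joined then st.1 ++ [PySem.Str.slice joined (some st.2) none] else st.1

-- ===== PRECONDITION & SPEC =====
def Spec_cutLines (cuts : List String) (maxChar : Int) (out : List String) : Prop := out = cutLines_alt cuts maxChar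
instance (cuts : List String) (maxChar : Int) (out : List String) : Decidable (Spec_cutLines cuts maxChar out) := by unfold Spec_cutLines; infer_instance

-- ===== CLAIM (what is proved, stated in full; the proofs are below) =====
def Claim_equal_cutLines : Prop := ∀ (cuts : List String) (maxChar : Int), Dom_cutLines cuts maxChar → Spec_cutLines cuts maxChar (cutLines cuts maxChar)

-- ===== LEMMAS AND PROOFS =====

-- the token contributed at index i: the cut plus its '&&' separator (none on the last)
def tokenFn (n : Int) (p : Int × String) : List Char :=
  if p.1 < n - 1 then p.2.toList ++ ['&', '&'] else p.2.toList

-- structural form of the token list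
def mkToks : List String → List (List Char)
  | [] => []
  | [c] => [c.toList]
  | c :: rest => (c.toList ++ ['&', '&']) :: mkToks rest

-- end offsets of the tokens starting at position pos
def endsOf : List (List Char) → Int → List Int
  | [], _ => []
  | t :: ts, pos => (pos + t.length) :: endsOf ts (pos + t.length)

-- A's step with the separator branch factored out
def wrapStep (maxChar : Int) (st : List String × List Char) (tok : List Char) : List String × List Char :=
  let line := st.2 ++ tok
  if (line.length : Int) > maxChar then (st.1 ++ [String.ofList line], []) else (st.1, line)

theorem cutLinesStep_eq_wrapStep (n maxChar : Int) (st : List String × List Char) (p : Int × String) :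
    cutLinesStep n maxChar st p = wrapStep maxChar st (tokenFn n p) := by
  simp only [cutLinesStep, wrapStep, tokenFn, List.append_assoc]
  split_ifs <;> rfl

theorem map_tokenFn_enumerate (xs : List String) (s n : Nat) (h : s + xs.length = n) :
    (PySem.List.enumerate xs (s : Int)).map (tokenFn (n : Int)) = mkToks xs := by
  induction xs generalizing s with
  | nil => simp [PySem.List.enumerate_nil, mkToks]
  | cons x xs ih =>
    rw [PySem.List.enumerate_cons]
    cases xs with
    | nil =>
      simp at h
      have : ¬ ((s : Int) < (n : Int) - 1) := by omega
      simp [tokenFn, this, mkToks]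
    | cons y ys =>
      have hs : (s : Int) < (n : Int) - 1 := by
        simp [List.length] at h; omega
      have := ih (s + 1) (by simp at h ⊢; omega)
      push_cast at this
      simp only [List.map_cons, this, tokenFn, if_pos hs, mkToks]

-- the joined string is exactly the concatenation of the tokens
theorem join_eq_flatten_mkToks (cuts : List String) :
    PySem.Chars.join ['&', '&'] (cuts.map String.toList) = (mkToks cuts).flatten := by
  induction cuts with
  | nil => simp [PySem.Chars.join_nil, mkToks]
  | cons c rest ih =>
    cases rest with
    | nil => simp [PySem.Chars.join_singleton, mkToks]
    | cons d ds =>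
      simp only [List.map_cons] at ih ⊢
      rw [PySem.Chars.join_cons_cons, ih]
      simp [mkToks, List.append_assoc]

theorem toList_join_cuts (cuts : List String) :
    (PySem.Str.join "&&" cuts).toList = (mkToks cuts).flatten := by
  rw [PySem.Str.toList_join]
  have : "&&".toList = ['&', '&'] := rfl
  rw [this, join_eq_flatten_mkToks]

-- B's first loop computes exactly the token end offsets
theorem endsStep_eq (n : Int) (st : Int × List Int) (p : Int × String) :
    endsStep n st p = (st.1 + ((tokenFn n p).length : Int), st.2 ++ [st.1 + ((tokenFn n p).length : Int)]) := by
  simp only [endsStep, tokenFn, PySem.Str.len_eq]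
  split_ifs <;> simp <;> omega

theorem endsFold (n : Int) (ps : List (Int × String)) (pos : Int) (acc : List Int) :
    (ps.foldl (endsStep n) (pos, acc)).2 = acc ++ endsOf (ps.map (tokenFn n)) pos := by
  induction ps generalizing pos acc with
  | nil => simp [endsOf]
  | cons p ps ih =>
    rw [List.foldl_cons, endsStep_eq, ih]
    simp [endsOf]

-- core invariant: A's wrap fold over the tokens agrees with B's offset fold over the joined string
theorem core (maxChar : Int) (joined : String) (toks : List (List Char)) (res : List String)
    (start pos : Nat) (hsp : start ≤ pos) (hp : pos ≤ joined.toList.length)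
    (hrest : joined.toList.drop pos = toks.flatten) :
    (let st := toks.foldl (wrapStep maxChar) (res, (joined.toList.take pos).drop start);
     if st.2 ≠ [] then st.1 ++ [String.ofList st.2] else st.1)
    =
    (let st := (endsOf toks (pos : Int)).foldl (cutStep joined maxChar) (res, (start : Int));
     if st.2 < PySem.Str.len joined then st.1 ++ [PySem.Str.slice joined (some st.2) none] else st.1) := by
  induction toks generalizing res start pos with
  | nil =>
    have hd : joined.toList.drop pos = [] := by simpa using hrest
    have hlen : joined.toList.length ≤ pos := List.drop_eq_nil_iff.mp hd
    have hpos : pos = joined.toList.length := le_antisymm hp hlen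
    subst hpos
    simp only [endsOf, List.foldl_nil, PySem.Str.len_eq]
    rw [List.take_length]
    by_cases h : start < joined.toList.length
    · have h1 : joined.toList.drop start ≠ [] := by
        intro hc
        have := List.drop_eq_nil_iff.mp hc
        omega
      have h2 : ((start : Int) < (joined.toList.length : Int)) := by exact_mod_cast h
      rw [if_pos h1, if_pos h2]
      have ht : (PySem.Str.slice joined (some (start : Int)) none).toList = joined.toList.drop start := by
        rw [PySem.Str.toList_slice, PySem.Chars.slice_eq_listSlice, PySem.List.slice_from_natCast]
      have hsl := congrArg String.ofList ht
      rw [String.ofList_toList] at hsl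
      rw [hsl]
    · have h1 : joined.toList.drop start = [] := List.drop_eq_nil_iff.mpr (by omega)
      have h2 : ¬ ((start : Int) < (joined.toList.length : Int)) := by
        intro hc; exact h (by exact_mod_cast hc)
      rw [h1, if_neg (by simp), if_neg h2]
  | cons t ts ih =>
    have hflat : joined.toList.drop pos = t ++ ts.flatten := by simpa using hrest
    have hle : pos + t.length ≤ joined.toList.length := by
      have h1 := congrArg List.length hflat
      rw [List.length_drop, List.length_append] at h1
      omega
    have hdrop : joined.toList.drop (pos + t.length) = ts.flatten := by
      have h1 : joined.toList.drop (pos + t.length) = (joined.toList.drop pos).drop t.length := by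
        rw [List.drop_drop, Nat.add_comm]
      rw [h1, hflat]
      exact List.drop_left
    have htake : joined.toList.take (pos + t.length) = joined.toList.take pos ++ t := by
      rw [List.take_add, hflat, List.take_append_of_le_length (le_refl t.length), List.take_length]
    have hlinet : (joined.toList.take pos).drop start ++ t = (joined.toList.take (pos + t.length)).drop start := by
      rw [htake, List.drop_append_of_le_length]
      rw [List.length_take, Nat.min_eq_left hp]
      exact hsp
    have hll : ((joined.toList.take pos).drop start).length = pos - start := by
      rw [List.length_drop, List.length_take, Nat.min_eq_left hp]
    have hlen_line : ((((joined.toList.take pos).drop start) ++ t).length : Int)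
        = (pos : Int) + (t.length : Int) - (start : Int) := by
      rw [List.length_append, hll]
      omega
    simp only [endsOf, List.foldl_cons, wrapStep, cutStep]
    have hcast : ((pos : Int) + (t.length : Int)) = (((pos + t.length : Nat)) : Int) := by push_cast; ring
    by_cases hc : ((pos : Int) + (t.length : Int) - (start : Int) > maxChar)
    · have hcondA : ((((joined.toList.take pos).drop start ++ t).length : Int) > maxChar) := by
        rw [hlen_line]; exact hc
      rw [if_pos hcondA, if_pos hc]
      have ht : (PySem.Str.slice joined (some (start : Int)) (some ((pos : Int) + (t.length : Int)))).toList
          = (joined.toList.take pos).drop start ++ t := by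
        rw [PySem.Str.toList_slice, PySem.Chars.slice_eq_listSlice, hcast, PySem.List.slice_natCast,
          hlinet, List.drop_take]
      have hsl := congrArg String.ofList ht
      rw [String.ofList_toList] at hsl
      have hstep := ih (res ++ [String.ofList ((joined.toList.take pos).drop start ++ t)])
        (pos + t.length) (pos + t.length) (le_refl _) hle hdrop
      have hempty : (joined.toList.take (pos + t.length)).drop (pos + t.length) = [] :=
        List.drop_eq_nil_iff.mpr (by rw [List.length_take]; exact Nat.min_le_left _ _)
      rw [hempty] at hstep
      rw [hsl, hcast]
      exact hstep
    · have hcondA : ¬ ((((joined.toList.take pos).drop start ++ t).length : Int) > maxChar) := by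
        rw [hlen_line]; exact hc
      rw [if_neg hcondA, if_neg hc]
      have hstep := ih res start (pos + t.length) (by omega) hle hdrop
      rw [hlinet, hcast]
      exact hstep

theorem cutLines_eq_alt (cuts : List String) (maxChar : Int) :
    cutLines cuts maxChar = cutLines_alt cuts maxChar := by
  unfold cutLines cutLines_alt
  have hmap : (PySem.List.enumerate cuts (0 : Int)).map (tokenFn (cuts.length : Int)) = mkToks cuts := by
    have := map_tokenFn_enumerate cuts 0 cuts.length (by simp)
    simpa using this
  have hA : (PySem.List.enumerate cuts 0).foldl (cutLinesStep (cuts.length : Int) maxChar) ([], [])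
      = (mkToks cuts).foldl (wrapStep maxChar) ([], []) := by
    rw [← hmap, List.foldl_map]
    congr 1
    funext st p
    exact cutLinesStep_eq_wrapStep _ _ st p
  have hE : ((PySem.List.enumerate cuts 0).foldl (endsStep (cuts.length : Int)) (0, [])).2
      = endsOf (mkToks cuts) 0 := by
    rw [endsFold, hmap]
    simp
  rw [hA, hE]
  have hcore := core maxChar (PySem.Str.join "&&" cuts) (mkToks cuts) [] 0 0 (le_refl _)
    (by simp) (by simpa using toList_join_cuts cuts)
  simpa using hcore

-- ===== VERDICT (by name: the statement is the Claim_ definition above) =====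
theorem cutLines_spec : Claim_equal_cutLines := by
  intro cuts maxChar _
  unfold Spec_cutLines
  exact cutLines_eq_alt cuts maxChar
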